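-- pv_equiv track=rewrite | github.com/Krisje1973/AdventOfCode | 2023/Day01/grid.py | generate_figure_positions
-- ===== SOURCE A (Python) =====
-- def generate_figure_positions(grid_width, grid_height, figure):
--
--     positions = []
--
--
--
--     for row in range(grid_height):
--
--         for col in range(grid_width):
--
--             placed_positions = [(row + r, col + c) for r, c in figure]
--
--             if all(0 <= r < grid_height and 0 <= c < grid_width for r, c in placed_positions):
--
--                 positions.append(placed_positions)
--
--
--
--     return positions
-- ===== SOURCE B (Python) =====
-- def generate_figure_positions(grid_width, grid_height, figure):
--     min_r = min((r for r, _ in figure), default=0)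
--     max_r = max((r for r, _ in figure), default=0)
--     min_c = min((c for _, c in figure), default=0)
--     max_c = max((c for _, c in figure), default=0)
--     return [[(row + r, col + c) for r, c in figure]
--             for row in range(max(0, -min_r), min(grid_height, grid_height - max_r))
--             for col in range(max(0, -min_c), min(grid_width, grid_width - max_c))]
-- ===== Notes on version B (the rewrite author's own statement) =====
-- stated objective: alternative
-- what changed: Instead of scanning every grid cell and testing all figure offsets per cell, B precomputes the min/max row and column offsets of the figure once and enumerates exactly the valid row/column ranges directly.
import Mathlib
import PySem

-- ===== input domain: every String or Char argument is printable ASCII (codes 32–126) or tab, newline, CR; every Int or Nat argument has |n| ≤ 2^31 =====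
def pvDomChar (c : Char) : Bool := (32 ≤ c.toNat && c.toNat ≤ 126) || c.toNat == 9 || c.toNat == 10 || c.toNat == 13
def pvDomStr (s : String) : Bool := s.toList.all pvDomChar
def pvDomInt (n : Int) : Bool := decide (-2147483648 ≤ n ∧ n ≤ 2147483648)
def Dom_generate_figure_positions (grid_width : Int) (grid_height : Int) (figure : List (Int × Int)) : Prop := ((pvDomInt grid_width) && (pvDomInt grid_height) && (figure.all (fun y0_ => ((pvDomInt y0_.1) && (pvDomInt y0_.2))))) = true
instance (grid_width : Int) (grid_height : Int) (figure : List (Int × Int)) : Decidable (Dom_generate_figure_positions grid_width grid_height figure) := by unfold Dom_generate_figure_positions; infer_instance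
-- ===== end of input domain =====

-- ===== PORT A =====
-- B replaces the full W*H grid scan (test every cell) by direct iteration over the precomputed valid row/column ranges (objective: alternative).
def generate_figure_positions (grid_width : Int) (grid_height : Int) (figure : List (Int × Int)) : List (List (Int × Int)) :=
  (PySem.List.pyRange 0 grid_height 1).foldl (fun positions row =>
    (PySem.List.pyRange 0 grid_width 1).foldl (fun positions col =>
      let placed := figure.map (fun rc => (row + rc.1, col + rc.2))
      if placed.all (fun rc =>
          decide (0 ≤ rc.1 ∧ rc.1 < grid_height ∧ 0 ≤ rc.2 ∧ rc.2 < grid_width)) then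
        positions ++ [placed]
      else positions) positions) []

-- ===== PORT B =====
def generate_figure_positions_alt (grid_width : Int) (grid_height : Int) (figure : List (Int × Int)) : List (List (Int × Int)) :=
  let min_r := (PySem.List.min? (figure.map Prod.fst) (fun x => x)).getD 0
  let max_r := (PySem.List.max? (figure.map Prod.fst) (fun x => x)).getD 0
  let min_c := (PySem.List.min? (figure.map Prod.snd) (fun x => x)).getD 0
  let max_c := (PySem.List.max? (figure.map Prod.snd) (fun x => x)).getD 0
  (PySem.List.pyRange (max 0 (-min_r)) (min grid_height (grid_height - max_r)) 1).flatMap (fun row =>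
    (PySem.List.pyRange (max 0 (-min_c)) (min grid_width (grid_width - max_c)) 1).map (fun col =>
      figure.map (fun rc => (row + rc.1, col + rc.2))))

-- ===== PRECONDITION & SPEC =====
def Spec_generate_figure_positions (grid_width : Int) (grid_height : Int) (figure : List (Int × Int)) (out : List (List (Int × Int))) : Prop := out = generate_figure_positions_alt grid_width grid_height figure
instance (grid_width : Int) (grid_height : Int) (figure : List (Int × Int)) (out : List (List (Int × Int))) : Decidable (Spec_generate_figure_positions grid_width grid_height figure out) := by unfold Spec_generate_figure_positions; infer_instance

-- ===== CLAIM (what is proved, stated in full; the proofs are below) =====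
def Claim_equal_generate_figure_positions : Prop := ∀ (grid_width : Int) (grid_height : Int) (figure : List (Int × Int)), Dom_generate_figure_positions grid_width grid_height figure → Spec_generate_figure_positions grid_width grid_height figure (generate_figure_positions grid_width grid_height figure)

-- ===== LEMMAS AND PROOFS =====

-- ===== VERDICT (by name: the statement is the Claim_ definition above) =====



-- filter of an integer range by an interval predicate is a subrange
theorem pv_filter_pyRange (a b lo hi : Int) :
    (PySem.List.pyRange a b 1).filter (fun x => decide (lo ≤ x ∧ x < hi)) =
      PySem.List.pyRange (max a lo) (min b hi) 1 := by
  by_cases hab : b ≤ a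
  · rw [PySem.List.pyRange_one_eq_nil hab, PySem.List.pyRange_one_eq_nil (by omega)]
    rfl
  · rw [not_le] at hab
    have ih := pv_filter_pyRange (a + 1) b lo hi
    rw [PySem.List.pyRange_one_cons hab, List.filter_cons, ih]
    by_cases hmem : lo ≤ a ∧ a < hi
    · have h1 : max a lo = a := by omega
      have h2 : max (a + 1) lo = a + 1 := by omega
      have h3 : a < min b hi := by omega
      rw [h1, h2, PySem.List.pyRange_one_cons h3]
      simp [hmem]
    · by_cases hlo : a < lo
      · have heq : max a lo = max (a + 1) lo := by omega
        simp [hmem, heq]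
      · rw [PySem.List.pyRange_one_eq_nil (show min b hi ≤ max a lo by omega),
            PySem.List.pyRange_one_eq_nil (show min b hi ≤ max (a + 1) lo by omega)]
        simp [hmem]
termination_by (b - a).toNat
decreasing_by omega

theorem pv_flatMap_if {α : Type} (l : List Int) (p : Int → Bool) (g : Int → List α) :
    l.flatMap (fun x => if p x then g x else []) = (l.filter p).flatMap g := by
  induction l with
  | nil => rfl
  | cons x t ih =>
    by_cases hp : p x = true <;>
      simp [List.flatMap_cons, hp, ih]

theorem pv_flatMap_congr {α : Type} (l : List Int) (f g : Int → List α)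
    (h : ∀ x ∈ l, f x = g x) : l.flatMap f = l.flatMap g := by
  induction l with
  | nil => rfl
  | cons x t ih =>
    simp only [List.flatMap_cons, h x (List.mem_cons_self), ih (fun y hy => h y (List.mem_cons_of_mem _ hy))]

-- one-dimensional bounds characterisation via min/max
theorem pv_oneD (xs : List Int) (t n : Int) (h0 : 0 ≤ t) (h1 : t < n) :
    (∀ x ∈ xs, 0 ≤ t + x ∧ t + x < n) ↔
      (-(PySem.List.min? xs (fun x => x)).getD 0 ≤ t ∧
        t < n - (PySem.List.max? xs (fun x => x)).getD 0) := by
  cases xs with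
  | nil =>
    simp only [PySem.List.min?, PySem.List.max?, List.foldl_nil, Option.getD_none]
    constructor
    · intro _; constructor <;> omega
    · intro _ x hx; cases hx
  | cons y ys =>
    have hmin : PySem.List.min? (y :: ys) (fun x => x) = some (ys.foldl min y) :=
      PySem.List.min?_id_cons y ys
    have hmax : PySem.List.max? (y :: ys) (fun x => x) = some (ys.foldl max y) :=
      PySem.List.max?_id_cons y ys
    have hmmem := PySem.List.min?_mem hmin
    have hmle := PySem.List.min?_isMin hmin
    have hMmem := PySem.List.max?_mem hmax
    have hMge := PySem.List.max?_isMax hmax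
    rw [hmin, hmax]
    simp only [Option.getD_some]
    constructor
    · intro H
      have h1 := H _ hmmem
      have h2 := H _ hMmem
      constructor <;> omega
    · intro hb x hx
      have h1 := hmle x hx
      have h2 := hMge x hx
      simp only at h1 h2
      constructor <;> omega


theorem pv_test_split (grid_width grid_height row col : Int) (figure : List (Int × Int))
    (hr0 : 0 ≤ row) (hr1 : row < grid_height) (hc0 : 0 ≤ col) (hc1 : col < grid_width) :
    (figure.all fun rc =>
        decide (0 ≤ row + rc.1 ∧ row + rc.1 < grid_height ∧ 0 ≤ col + rc.2 ∧ col + rc.2 < grid_width)) =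
    (decide (-(PySem.List.min? (figure.map Prod.fst) (fun x => x)).getD 0 ≤ row ∧
        row < grid_height - (PySem.List.max? (figure.map Prod.fst) (fun x => x)).getD 0) &&
     decide (-(PySem.List.min? (figure.map Prod.snd) (fun x => x)).getD 0 ≤ col ∧
        col < grid_width - (PySem.List.max? (figure.map Prod.snd) (fun x => x)).getD 0)) := by
  rw [Bool.eq_iff_iff]
  simp only [List.all_eq_true, decide_eq_true_eq, Bool.and_eq_true]
  constructor
  · intro H
    constructor
    · refine (pv_oneD (figure.map Prod.fst) row grid_height hr0 hr1).mp ?_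
      intro x hx
      obtain ⟨rc, hrc, rfl⟩ := List.mem_map.mp hx
      exact ⟨(H rc hrc).1, (H rc hrc).2.1⟩
    · refine (pv_oneD (figure.map Prod.snd) col grid_width hc0 hc1).mp ?_
      intro x hx
      obtain ⟨rc, hrc, rfl⟩ := List.mem_map.mp hx
      exact ⟨(H rc hrc).2.2.1, (H rc hrc).2.2.2⟩
  · intro ⟨hrow, hcol⟩ rc hrc
    have h1 := (pv_oneD (figure.map Prod.fst) row grid_height hr0 hr1).mpr hrow rc.1
      (List.mem_map.mpr ⟨rc, hrc, rfl⟩)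
    have h2 := (pv_oneD (figure.map Prod.snd) col grid_width hc0 hc1).mpr hcol rc.2
      (List.mem_map.mpr ⟨rc, hrc, rfl⟩)
    exact ⟨h1.1, h1.2, h2.1, h2.2⟩

theorem pv_main (grid_width grid_height : Int) (figure : List (Int × Int)) :
    generate_figure_positions grid_width grid_height figure =
      generate_figure_positions_alt grid_width grid_height figure := by
  unfold generate_figure_positions generate_figure_positions_alt
  simp only [List.all_map, Function.comp_def, PySem.List.foldl_append_if,
    PySem.List.foldl_append_eq_flatMap, List.nil_append]
  have hcols : ∀ row : Int, 0 ≤ row → row < grid_height →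
      (((PySem.List.pyRange 0 grid_width 1).filter fun col =>
          figure.all fun rc =>
            decide (0 ≤ row + rc.1 ∧ row + rc.1 < grid_height ∧
              0 ≤ col + rc.2 ∧ col + rc.2 < grid_width)).map
        (fun col => figure.map fun rc => (row + rc.1, col + rc.2))) =
      (if decide (-(PySem.List.min? (figure.map Prod.fst) (fun x => x)).getD 0 ≤ row ∧
            row < grid_height - (PySem.List.max? (figure.map Prod.fst) (fun x => x)).getD 0) then
        (PySem.List.pyRange (max 0 (-(PySem.List.min? (figure.map Prod.snd) (fun x => x)).getD 0))
            (min grid_width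
              (grid_width - (PySem.List.max? (figure.map Prod.snd) (fun x => x)).getD 0)) 1).map
          (fun col => figure.map fun rc => (row + rc.1, col + rc.2))
      else []) := by
    intro row h0 h1
    rw [List.filter_congr (fun col hcol =>
      pv_test_split grid_width grid_height row col figure h0 h1
        (PySem.List.mem_pyRange_one.mp hcol).1 (PySem.List.mem_pyRange_one.mp hcol).2)]
    by_cases hrowb : (-(PySem.List.min? (figure.map Prod.fst) (fun x => x)).getD 0 ≤ row ∧
        row < grid_height - (PySem.List.max? (figure.map Prod.fst) (fun x => x)).getD 0)
    · rw [decide_eq_true hrowb]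
      simp only [Bool.true_and, if_true]
      rw [pv_filter_pyRange]
    · rw [decide_eq_false hrowb]
      simp
  rw [pv_flatMap_congr _ _ _
      (fun row hrow =>
        hcols row (PySem.List.mem_pyRange_one.mp hrow).1 (PySem.List.mem_pyRange_one.mp hrow).2),
    pv_flatMap_if, pv_filter_pyRange]

theorem generate_figure_positions_spec : Claim_equal_generate_figure_positions := by
  intro grid_width grid_height figure _
  unfold Spec_generate_figure_positions
  exact pv_main grid_width grid_height figure
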